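-- pv_equiv track=rewrite | github.com/Demagalawrence/harakacare | apps/triage/tools/red_flag_detection.py | _get_detection_method
-- ===== SOURCE A (Python) =====
-- from typing import Dict, Any, List
--
-- def _get_detection_method(flags_list: List[Dict]) -> str:
--     """Determine primary detection method"""
--     if not flags_list:
--         return 'none'
--
--     sources = [f['source'] for f in flags_list]
--
--     if 'primary_symptom' in sources:
--         return 'user_input'
--     elif 'severity_escalation' in sources:
--         return 'rule_based'
--     elif 'symptom_combination' in sources:
--         return 'rule_based'
--     else:
--         return 'ai_detected'
-- ===== SOURCE B (Python) =====
-- _RANK = {'primary_symptom': 0, 'severity_escalation': 1, 'symptom_combination': 1}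
-- _LABELS = ['user_input', 'rule_based', 'ai_detected']
--
-- def _get_detection_method(flags_list):
--     """Determine primary detection method"""
--     if not flags_list:
--         return 'none'
--     best = min(_RANK.get(f['source'], 2) for f in flags_list)
--     return _LABELS[best]
-- ===== Notes on version B (the rewrite author's own statement) =====
-- stated objective: idiomatic
-- what changed: Replaces the three sequential 'in sources' membership scans (after building the sources list) by a priority table and a single minimum-rank pass over the flags, indexing the winning label.
import Mathlib
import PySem

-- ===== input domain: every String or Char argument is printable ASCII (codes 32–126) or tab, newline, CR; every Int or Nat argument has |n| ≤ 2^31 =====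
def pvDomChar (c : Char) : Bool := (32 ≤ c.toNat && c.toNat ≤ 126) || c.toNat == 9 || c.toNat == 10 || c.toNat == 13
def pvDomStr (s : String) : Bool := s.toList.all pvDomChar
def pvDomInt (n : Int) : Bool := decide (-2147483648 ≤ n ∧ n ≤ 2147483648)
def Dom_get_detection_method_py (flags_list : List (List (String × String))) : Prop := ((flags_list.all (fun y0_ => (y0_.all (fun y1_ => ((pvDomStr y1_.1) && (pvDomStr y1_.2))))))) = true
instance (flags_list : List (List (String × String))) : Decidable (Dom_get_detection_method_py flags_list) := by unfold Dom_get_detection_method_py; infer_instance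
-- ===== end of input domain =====

-- B replaces A's three sequential membership scans over the sources list by a
-- priority table and a single minimum-rank pass (idiomatic table-driven form).


-- ===== PORT A =====
-- f['source'] on an association list: first match; KeyError (none) is excluded by Pre_,
-- so the .getD "" default is never reached on admitted inputs.
def gdmSource (f : List (String × String)) : String :=
  ((f.find? (fun kv => kv.1 == "source")).map Prod.snd).getD ""

def get_detection_method_py (flags_list : List (List (String × String))) : String :=
  if flags_list = [] then "none"
  else
    let sources := flags_list.map gdmSource
    if sources.contains "primary_symptom" then "user_input"
    else if sources.contains "severity_escalation" then "rule_based"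
    else if sources.contains "symptom_combination" then "rule_based"
    else "ai_detected"

-- ===== PORT B =====
-- _RANK.get(source, 2)
def gdmRank (s : String) : Int :=
  PySem.Dict.getD (PySem.Dict.ofList
    [("primary_symptom", (0 : Int)), ("severity_escalation", 1), ("symptom_combination", 1)]) s 2

def get_detection_method_py_alt (flags_list : List (List (String × String))) : String :=
  if flags_list = [] then "none"
  else
    let best := (PySem.List.min? (flags_list.map (fun f => gdmRank (gdmSource f))) (fun x => x)).getD 2
    (PySem.List.pyGet? ["user_input", "rule_based", "ai_detected"] best).getD ""

-- ===== PRECONDITION & SPEC =====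
-- Pre_ excludes flag dicts without a 'source' key, on which Python A raises KeyError.
def Pre_get_detection_method_py (flags_list : List (List (String × String))) : Prop :=
  ∀ f ∈ flags_list, (f.find? (fun kv => kv.1 == "source")).isSome

instance (flags_list : List (List (String × String))) : Decidable (Pre_get_detection_method_py flags_list) := by unfold Pre_get_detection_method_py; infer_instance

def pvWitness_get_detection_method_py : (List (List (String × String))) :=
  [[("source", "primary_symptom")], [("source", "weird")]]

def Spec_get_detection_method_py (flags_list : List (List (String × String))) (out : String) : Prop := out = get_detection_method_py_alt flags_list
instance (flags_list : List (List (String × String))) (out : String) : Decidable (Spec_get_detection_method_py flags_list out) := by unfold Spec_get_detection_method_py; infer_instance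

-- ===== CLAIM (what is proved, stated in full; the proofs are below) =====
def Claim_equal_get_detection_method_py : Prop := ∀ (flags_list : List (List (String × String))), Dom_get_detection_method_py flags_list → Pre_get_detection_method_py flags_list → Spec_get_detection_method_py flags_list (get_detection_method_py flags_list)

-- ===== LEMMAS AND PROOFS =====

lemma gdmDict_eq :
    PySem.Dict.ofList
      [("primary_symptom", (0 : Int)), ("severity_escalation", 1), ("symptom_combination", 1)] =
    PySem.Dict.mk
      [("primary_symptom", (0 : Int)), ("severity_escalation", 1), ("symptom_combination", 1)] := by
  decide

lemma gdmRank_eq (s : String) :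
    gdmRank s = if s = "primary_symptom" then 0
      else if s = "severity_escalation" then 1
      else if s = "symptom_combination" then 1 else 2 := by
  unfold gdmRank
  rw [gdmDict_eq]
  by_cases h0 : s = "primary_symptom"
  · subst h0; decide
  · by_cases h1 : s = "severity_escalation"
    · subst h1; decide
    · by_cases h2 : s = "symptom_combination"
      · subst h2; decide
      · have b0 : ("primary_symptom" == s) = false := by simp [Ne.symm h0]
        have b1 : ("severity_escalation" == s) = false := by simp [Ne.symm h1]
        have b2 : ("symptom_combination" == s) = false := by simp [Ne.symm h2]
        simp [PySem.Dict.getD, b0, b1, b2, h0, h1, h2, PySem.Dict.get?]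

lemma gdmRank_le_two (s : String) : gdmRank s ≤ 2 := by
  rw [gdmRank_eq]; split_ifs <;> omega

/-- Closed form of B's running minimum of ranks, in terms of A's membership tests. -/
lemma foldl_min_rank (l : List String) (acc : Int) (h : acc ≤ 2) :
    (l.map gdmRank).foldl min acc =
      min acc (if l.contains "primary_symptom" then 0
        else if l.contains "severity_escalation" || l.contains "symptom_combination" then 1
        else 2) := by
  induction l generalizing acc with
  | nil => simp; omega
  | cons a t ih =>
    have ha : gdmRank a ≤ 2 := gdmRank_le_two a
    have h' : min acc (gdmRank a) ≤ 2 := by omega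
    simp only [List.map_cons, List.foldl_cons, ih (min acc (gdmRank a)) h',
      List.contains_cons]
    rw [gdmRank_eq a]
    by_cases h0 : a = "primary_symptom" <;>
      by_cases h1 : a = "severity_escalation" <;>
        by_cases h2 : a = "symptom_combination" <;>
    simp_all [beq_iff_eq, Ne.symm] <;> split_ifs <;> omega

lemma min_rank_cons (s : String) (t' : List String) :
    (min (if s = "primary_symptom" then (0 : Int) else if s = "severity_escalation" then 1
            else if s = "symptom_combination" then 1 else 2)
         (if t'.contains "primary_symptom" then 0
            else if (t'.contains "severity_escalation" || t'.contains "symptom_combination") then 1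
            else 2))
      = if (s :: t').contains "primary_symptom" then 0
          else if ((s :: t').contains "severity_escalation" || (s :: t').contains "symptom_combination") then 1
          else 2 := by
  simp only [Bool.or_eq_true, List.contains_eq_any_beq] at *
  split_ifs <;> first | omega | simp_all [@eq_comm String]

lemma label_of_rank (l : List String) :
    (if l.contains "primary_symptom" = true then "user_input"
       else if l.contains "severity_escalation" = true then "rule_based"
       else if l.contains "symptom_combination" = true then "rule_based" else "ai_detected")
      = (PySem.List.pyGet? ["user_input", "rule_based", "ai_detected"]
          (if l.contains "primary_symptom" then (0 : Int)
             else if (l.contains "severity_escalation" || l.contains "symptom_combination") then 1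
             else 2)).getD "" := by
  by_cases c0 : "primary_symptom" ∈ l <;>
    by_cases c1 : "severity_escalation" ∈ l <;>
      by_cases c2 : "symptom_combination" ∈ l <;>
        simp [c0, c1, c2]

-- ===== VERDICT (by name: the statement is the Claim_ definition above) =====
theorem get_detection_method_py_spec : Claim_equal_get_detection_method_py := by
  intro fl _ _
  unfold Spec_get_detection_method_py get_detection_method_py get_detection_method_py_alt
  cases fl with
  | nil => rfl
  | cons f t =>
    simp only [if_neg (List.cons_ne_nil f t)]
    rw [show (f :: t).map (fun f => gdmRank (gdmSource f))
          = ((f :: t).map gdmSource).map gdmRank by simp [List.map_map]]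
    obtain ⟨s, t', hst⟩ : ∃ s t', (f :: t).map gdmSource = s :: t' :=
      ⟨gdmSource f, t.map gdmSource, rfl⟩
    rw [hst]
    simp only [List.map_cons]
    rw [PySem.List.min?_id_cons]
    simp only [Option.getD_some]
    rw [foldl_min_rank t' (gdmRank s) (gdmRank_le_two s), gdmRank_eq s,
        min_rank_cons s t', label_of_rank]
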